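-- pv_equiv track=rewrite | github.com/SahanMetpally/Artificial_Intelligence | Unit 2/NQueens.py | equation
-- ===== SOURCE A (Python) =====
-- def equation(n):
--     count = 0
--     lit = []
--     for i in range(1,n,2):
--         lit.append(i)
--         count += 1
--     for i in range(0,n,2):
--         lit.append(i)
--         count += 1
--     return lit
-- ===== SOURCE B (Python) =====
-- def equation(n):
--     odds = []
--     evens = []
--     for i in range(n):
--         if i % 2:
--             odds.append(i)
--         else:
--             evens.append(i)
--     return odds + evens
-- ===== Notes on version B (the rewrite author's own statement) =====
-- stated objective: simpler
-- what changed: One pass over range(n) splitting into odds/evens accumulators and concatenating, instead of two separately stepped range(.,.,2) loops; the unused count variable is dropped.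
import Mathlib
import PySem

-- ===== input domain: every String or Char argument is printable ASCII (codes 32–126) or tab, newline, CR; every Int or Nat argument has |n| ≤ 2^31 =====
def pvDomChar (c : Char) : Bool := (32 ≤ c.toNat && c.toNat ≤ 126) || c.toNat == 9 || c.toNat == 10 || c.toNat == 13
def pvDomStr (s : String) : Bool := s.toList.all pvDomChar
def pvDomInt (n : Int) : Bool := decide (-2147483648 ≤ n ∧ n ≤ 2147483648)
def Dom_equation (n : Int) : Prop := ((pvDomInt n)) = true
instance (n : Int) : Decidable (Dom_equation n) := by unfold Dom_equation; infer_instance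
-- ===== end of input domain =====

-- B replaces A's two separately stepped range(.,.,2) loops by one pass over range(n)
-- splitting into odds/evens accumulators (objective: simpler, same cost).

-- ===== PORT A =====
def equation (n : Int) : List Int :=
  let count : Int := 0
  let lit : List Int := []
  let s1 := (PySem.List.pyRange 1 n 2).foldl (fun (s : List Int × Int) i => (s.1 ++ [i], s.2 + 1)) (lit, count)
  let s2 := (PySem.List.pyRange 0 n 2).foldl (fun (s : List Int × Int) i => (s.1 ++ [i], s.2 + 1)) s1
  s2.1

-- ===== PORT B =====
def equation_alt (n : Int) : List Int :=
  let p := (PySem.List.pyRange 0 n 1).foldl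
    (fun (p : List Int × List Int) i =>
      if PySem.Int.mod i 2 ≠ 0 then (p.1 ++ [i], p.2) else (p.1, p.2 ++ [i]))
    (([] : List Int), ([] : List Int))
  p.1 ++ p.2

-- ===== PRECONDITION & SPEC =====
def Spec_equation (n : Int) (out : List Int) : Prop := out = equation_alt n
instance (n : Int) (out : List Int) : Decidable (Spec_equation n out) := by unfold Spec_equation; infer_instance

-- ===== CLAIM (what is proved, stated in full; the proofs are below) =====
def Claim_equal_equation : Prop := ∀ (n : Int), Dom_equation n → Spec_equation n (equation n)

-- ===== LEMMAS AND PROOFS =====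

-- A's loop state (lit, count): the list component just appends the whole range.
theorem pvFoldA (l : List Int) (s : List Int × Int) :
    (l.foldl (fun (s : List Int × Int) i => (s.1 ++ [i], s.2 + 1)) s).1 = s.1 ++ l := by
  induction l generalizing s with
  | nil => simp
  | cons x xs ih => simp [List.foldl_cons, ih]

-- B's loop state (odds, evens): each component collects one filter.
theorem pvFoldB (l : List Int) (a b : List Int) :
    l.foldl
      (fun (p : List Int × List Int) i =>
        if PySem.Int.mod i 2 ≠ 0 then (p.1 ++ [i], p.2) else (p.1, p.2 ++ [i])) (a, b)
    = (a ++ l.filter (fun i => PySem.Int.mod i 2 ≠ 0),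
       b ++ l.filter (fun i => ¬ (PySem.Int.mod i 2 ≠ 0))) := by
  induction l generalizing a b with
  | nil => simp
  | cons x xs ih =>
    rw [List.foldl_cons]
    by_cases h : PySem.Int.mod x 2 ≠ 0
    · rw [if_pos h, ih, List.filter_cons, List.filter_cons,
          if_pos (decide_eq_true h), if_neg (by simpa using h)]
      simp
    · rw [if_neg h, ih, List.filter_cons, List.filter_cons,
          if_neg (by simpa using h), if_pos (by simpa using h)]
      simp

-- closed forms of the two step-2 ranges over a Nat bound
theorem pvOdds (m : Nat) :
    PySem.List.pyRange 1 (m : Int) 2 = (List.range (m / 2)).map (fun k : Nat => 1 + 2 * (k : Int)) := by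
  rw [PySem.List.pyRange_of_pos _ _ (by norm_num : (0:Int) < 2)]
  have hc : (if (1:Int) < (m:Int) then (((m:Int) - 1 + 2 - 1) / 2).toNat else 0) = m / 2 := by
    split_ifs with h <;> omega
  rw [hc]

theorem pvEvens (m : Nat) :
    PySem.List.pyRange 0 (m : Int) 2 = (List.range ((m + 1) / 2)).map (fun k : Nat => 0 + 2 * (k : Int)) := by
  rw [PySem.List.pyRange_of_pos _ _ (by norm_num : (0:Int) < 2)]
  have hc : (if (0:Int) < (m:Int) then (((m:Int) - 0 + 2 - 1) / 2).toNat else 0) = (m + 1) / 2 := by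
    split_ifs with h <;> omega
  rw [hc]

theorem pvOddSucc (m : Nat) :
    PySem.List.pyRange 1 ((m : Int) + 1) 2
      = PySem.List.pyRange 1 (m : Int) 2 ++ (if m % 2 = 1 then [(m : Int)] else []) := by
  have h1 : ((m : Int) + 1) = ((m + 1 : Nat) : Int) := by push_cast; ring
  rw [h1, pvOdds, pvOdds]
  by_cases h : m % 2 = 1
  · have h2 : (m + 1) / 2 = m / 2 + 1 := by omega
    rw [h2, List.range_succ, List.map_append]
    simp [h]
    omega
  · have h2 : (m + 1) / 2 = m / 2 := by omega
    simp [h2, h]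

theorem pvEvenSucc (m : Nat) :
    PySem.List.pyRange 0 ((m : Int) + 1) 2
      = PySem.List.pyRange 0 (m : Int) 2 ++ (if m % 2 = 0 then [(m : Int)] else []) := by
  have h1 : ((m : Int) + 1) = ((m + 1 : Nat) : Int) := by push_cast; ring
  rw [h1, pvEvens, pvEvens]
  by_cases h : m % 2 = 0
  · have h2 : (m + 1 + 1) / 2 = (m + 1) / 2 + 1 := by omega
    rw [h2, List.range_succ, List.map_append]
    simp [h]
    omega
  · have h2 : (m + 1 + 1) / 2 = (m + 1) / 2 := by omega
    simp [h2, h]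

-- the two filters of range(n) are exactly A's two step-2 ranges
theorem pvFilters (m : Nat) :
    (PySem.List.pyRange 0 (m : Int) 1).filter (fun i => PySem.Int.mod i 2 ≠ 0)
      = PySem.List.pyRange 1 (m : Int) 2
    ∧ (PySem.List.pyRange 0 (m : Int) 1).filter (fun i => ¬ (PySem.Int.mod i 2 ≠ 0))
      = PySem.List.pyRange 0 (m : Int) 2 := by
  induction m with
  | zero =>
    constructor <;>
      · rw [PySem.List.pyRange_one_eq_nil (by norm_num),
            PySem.List.pyRange_of_pos _ _ (by norm_num : (0:Int) < 2)]
        simp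
  | succ m ih =>
    have hcast : ((m + 1 : Nat) : Int) = (m : Int) + 1 := by push_cast; ring
    have hsplit : PySem.List.pyRange 0 ((m + 1 : Nat) : Int) 1
        = PySem.List.pyRange 0 (m : Int) 1 ++ [(m : Int)] := by
      rw [hcast, PySem.List.pyRange_one_succ_right (by positivity)]
    constructor
    · rw [hsplit, List.filter_append, ih.1, hcast, pvOddSucc]
      by_cases h : m % 2 = 1 <;> simp [List.filter_cons, h] <;> omega
    · rw [hsplit, List.filter_append, ih.2, hcast, pvEvenSucc]
      by_cases h : m % 2 = 0 <;> simp [List.filter_cons, h] <;> omega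

-- ===== VERDICT (by name: the statement is the Claim_ definition above) =====
theorem equation_spec : Claim_equal_equation := by
  intro n _
  unfold Spec_equation equation equation_alt
  simp only [pvFoldA, pvFoldB, List.nil_append]
  by_cases hn : n ≤ 0
  · rw [PySem.List.pyRange_one_eq_nil (by omega : n ≤ 0),
        PySem.List.pyRange_of_pos 1 n (by norm_num : (0:Int) < 2),
        PySem.List.pyRange_of_pos 0 n (by norm_num : (0:Int) < 2),
        if_neg (by omega : ¬ (1:Int) < n), if_neg (by omega : ¬ (0:Int) < n)]
    simp
  · obtain ⟨m, rfl⟩ : ∃ m : Nat, n = (m : Int) := ⟨n.toNat, by omega⟩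
    rw [(pvFilters m).1, (pvFilters m).2]
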